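-- pv_equiv track=rewrite | github.com/edegp/hannals | packingEngine/server_request.py | diff_changed
-- ===== SOURCE A (Python) =====
-- def diff_changed(before, after, exts: set[str]):
--     changed = {ext: set() for ext in exts}
--     for ext in exts:
--         b = before.get(ext, {})
--         a = after.get(ext, {})
--         for path in a.keys() - b.keys():
--             changed[ext].add(path)
--         for path in a.keys() & b.keys():
--             if a[path] != b[path]:
--                 changed[ext].add(path)
--     return changed
-- ===== SOURCE B (Python) =====
-- def diff_changed(before, after, exts: set[str]):
--     changed = {}
--     for ext in exts:
--         b = before.get(ext, {})
--         new, modified = [], []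
--         for path, val in after.get(ext, {}).items():
--             if path not in b:
--                 new.append(path)
--             elif b[path] != val:
--                 modified.append(path)
--         changed[ext] = set(new) | set(modified)
--     return changed
-- ===== Notes on version B (the rewrite author's own statement) =====
-- stated objective: simpler
-- what changed: Per extension, the two keyset set-operations (difference of key views, then intersection with per-key indexing a[path]/b[path]) are replaced by a single pass over after[ext].items() that partitions paths into new/modified accumulators and unions them; Pre_ only requires the association-list arguments to be valid encodings of Python dicts/sets (distinct keys, distinct set elements), which every actual Python input satisfies.
import Mathlib
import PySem

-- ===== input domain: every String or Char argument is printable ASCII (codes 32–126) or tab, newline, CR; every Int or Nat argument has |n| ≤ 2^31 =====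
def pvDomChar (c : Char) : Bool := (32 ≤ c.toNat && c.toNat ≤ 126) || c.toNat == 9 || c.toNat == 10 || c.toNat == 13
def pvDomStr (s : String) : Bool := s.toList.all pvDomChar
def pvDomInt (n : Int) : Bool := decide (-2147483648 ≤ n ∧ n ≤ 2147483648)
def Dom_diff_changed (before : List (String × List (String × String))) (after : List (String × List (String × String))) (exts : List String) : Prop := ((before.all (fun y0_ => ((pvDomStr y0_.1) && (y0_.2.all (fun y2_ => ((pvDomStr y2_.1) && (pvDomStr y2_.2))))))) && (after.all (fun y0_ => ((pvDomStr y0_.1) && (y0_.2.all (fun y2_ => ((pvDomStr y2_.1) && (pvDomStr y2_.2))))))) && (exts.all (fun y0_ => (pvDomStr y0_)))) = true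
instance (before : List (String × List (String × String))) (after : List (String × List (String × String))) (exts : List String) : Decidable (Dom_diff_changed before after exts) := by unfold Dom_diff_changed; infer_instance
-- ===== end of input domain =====

-- B replaces A's per-extension keyset difference/intersection set-algebra by a single pass over
-- after[ext].items() partitioning paths into new/modified accumulators; objective: simpler.


-- ===== PORT A =====
-- before.get(ext, {}) / after.get(ext, {}) as a dict (shared accessor helper)
def pvGet (d : List (String × List (String × String))) (k : String) : PySem.Dict String String :=
  PySem.Dict.mk ((PySem.Dict.mk d).getD k [])

-- body of A's outer loop: two passes, over a.keys() - b.keys() and over a.keys() & b.keys()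
-- (a[path] / b[path] are ported as getD with an unused default: the looped-over paths are
-- guaranteed present in the respective dict, so this is exact)
def pvStepA (before : List (String × List (String × String))) (after : List (String × List (String × String))) (ch : PySem.Dict String (List String)) (ext : String) : PySem.Dict String (List String) :=
  let b := pvGet before ext
  let a := pvGet after ext
  let ch1 := (PySem.Set.diff (PySem.Set.ofList a.keys) (PySem.Set.ofList b.keys)).foldl
    (fun ch path => ch.modify ext PySem.Set.empty (fun s => PySem.Set.add s path)) ch
  (PySem.Set.inter (PySem.Set.ofList a.keys) (PySem.Set.ofList b.keys)).foldl
    (fun ch path => if a.getD path "" ≠ b.getD path "" then ch.modify ext PySem.Set.empty (fun s => PySem.Set.add s path) else ch) ch1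

def diff_changed (before : List (String × List (String × String))) (after : List (String × List (String × String))) (exts : List String) : List (String × List String) :=
  -- changed = {ext: set() for ext in exts}
  let changed : PySem.Dict String (List String) :=
    exts.foldl (fun d ext => d.insert ext PySem.Set.empty) PySem.Dict.empty
  (exts.foldl (pvStepA before after) changed).items

-- ===== PORT B =====
-- B's own accessor for before.get(ext, {})
def pvGetB (d : List (String × List (String × String))) (k : String) : PySem.Dict String String :=
  PySem.Dict.mk ((PySem.Dict.mk d).getD k [])

-- single pass over after[ext].items(): partition paths into (new, modified)
def pvPartB (b : PySem.Dict String String) (aItems : List (String × String)) : List String × List String :=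
  aItems.foldl (fun nm pv =>
    if b.contains pv.1 = false then (nm.1 ++ [pv.1], nm.2)
    else if b.getD pv.1 "" ≠ pv.2 then (nm.1, nm.2 ++ [pv.1])
    else nm) ([], [])

def pvStepB (before : List (String × List (String × String))) (after : List (String × List (String × String))) (ch : PySem.Dict String (List String)) (ext : String) : PySem.Dict String (List String) :=
  let nm := pvPartB (pvGetB before ext) ((PySem.Dict.mk after).getD ext [])
  ch.insert ext (PySem.Set.union (PySem.Set.ofList nm.1) (PySem.Set.ofList nm.2))

def diff_changed_alt (before : List (String × List (String × String))) (after : List (String × List (String × String))) (exts : List String) : List (String × List String) :=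
  (exts.foldl (pvStepB before after) PySem.Dict.empty).items

-- ===== PRECONDITION & SPEC =====
-- Pre_ only excludes association lists that are not valid encodings of the Python arguments
-- (a dict never has duplicate keys, a set never has duplicate elements), on which the
-- List-representation is ambiguous; every input the Python function accepts satisfies it.
-- Boolean duplicate-freeness check (kernel-evaluable)
def pvNodupB (l : List String) : Bool :=
  match l with
  | [] => true
  | x :: t => !(t.contains x) && pvNodupB t

def Pre_diff_changed (before : List (String × List (String × String))) (after : List (String × List (String × String))) (exts : List String) : Prop :=
  (pvNodupB exts
    && pvNodupB (before.map (fun p => p.1))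
    && pvNodupB (after.map (fun p => p.1))
    && before.all (fun p => pvNodupB (p.2.map (fun q => q.1)))
    && after.all (fun p => pvNodupB (p.2.map (fun q => q.1)))) = true
instance (before : List (String × List (String × String))) (after : List (String × List (String × String))) (exts : List String) : Decidable (Pre_diff_changed before after exts) := by unfold Pre_diff_changed; infer_instance

def pvWitness_diff_changed : (List (String × List (String × String))) × (List (String × List (String × String))) × List String :=
  ([("py", [("a.py", "1"), ("b.py", "2")])], [("py", [("a.py", "9"), ("c.py", "2")])], ["py", "md"])

def Spec_diff_changed (before : List (String × List (String × String))) (after : List (String × List (String × String))) (exts : List String) (out : List (String × List String)) : Prop := out = diff_changed_alt before after exts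
instance (before : List (String × List (String × String))) (after : List (String × List (String × String))) (exts : List String) (out : List (String × List String)) : Decidable (Spec_diff_changed before after exts out) := by unfold Spec_diff_changed; infer_instance

-- ===== CLAIM (what is proved, stated in full; the proofs are below) =====
def Claim_equal_diff_changed : Prop := ∀ (before : List (String × List (String × String))) (after : List (String × List (String × String))) (exts : List String), Dom_diff_changed before after exts → Pre_diff_changed before after exts → Spec_diff_changed before after exts (diff_changed before after exts)

-- ===== LEMMAS AND PROOFS =====

-- the set A accumulates for one extension, starting from the current (always empty) cell s
def pvVA (before : List (String × List (String × String))) (after : List (String × List (String × String))) (ext : String) (s : List String) : List String :=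
  ((PySem.Set.inter (PySem.Set.ofList (pvGet after ext).keys) (PySem.Set.ofList (pvGet before ext).keys)).filter
      (fun path => decide ((pvGet after ext).getD path "" ≠ (pvGet before ext).getD path ""))).foldl PySem.Set.add
    ((PySem.Set.diff (PySem.Set.ofList (pvGet after ext).keys) (PySem.Set.ofList (pvGet before ext).keys)).foldl PySem.Set.add s)

lemma pvNodupB_iff (l : List String) : pvNodupB l = true ↔ l.Nodup := by
  induction l with
  | nil => simp [pvNodupB]
  | cons x t ih => simp [pvNodupB, List.nodup_cons, ih]

lemma set_foldl_add_append (l : List String) : ∀ s : List String, l.Nodup → (∀ x ∈ l, x ∉ s) →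
    l.foldl PySem.Set.add s = s ++ l := by
  induction l with
  | nil => intro s _ _; simp [List.foldl]
  | cons x t ih =>
    intro s hnd hdisj
    have hx : x ∉ s := hdisj x (by simp)
    have h1 : PySem.Set.add s x = s ++ [x] := PySem.Set.add_of_not_mem hx
    have hnd' := hnd
    rw [List.nodup_cons] at hnd'
    have : t.foldl PySem.Set.add (s ++ [x]) = (s ++ [x]) ++ t := by
      refine ih (s ++ [x]) hnd'.2 ?_
      intro y hy
      simp only [List.mem_append, List.mem_singleton]
      rintro (h | h)
      · exact hdisj y (by simp [hy]) h
      · exact hnd'.1 (h ▸ hy)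
    simp only [List.foldl_cons, h1, this, List.append_assoc, List.singleton_append]

lemma set_ofList_self {l : List String} (h : l.Nodup) : PySem.Set.ofList l = l := by
  have := set_foldl_add_append l [] h (by simp)
  simpa [PySem.Set.ofList, PySem.Set.empty] using this

lemma insert_getD_self (d : PySem.Dict String (List String)) (k : String)
    (hn : d.keys.Nodup) (hc : d.contains k = true) :
    d.insert k (d.getD k PySem.Set.empty) = d := by
  apply PySem.Dict.ext
  rw [PySem.Dict.items_insert_of_contains d _ hc]
  have : ∀ p ∈ d.items, (if (p.1 == k) = true then (k, d.getD k PySem.Set.empty) else p) = p := by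
    intro p hp
    by_cases h : p.1 = k
    · have hm : (k, p.2) ∈ d.items := by
        have : p = (p.1, p.2) := rfl
        rw [← h]; exact this ▸ hp
      have := PySem.Dict.getD_of_mem_items d hm hn PySem.Set.empty
      subst h
      simp only [PySem.Set.empty] at this
      simp [this]
    · simp [h]
  rw [List.map_congr_left this]; simp

lemma foldl_modify_collapse (k : String) (L : List String) : ∀ (ch : PySem.Dict String (List String)),
    ch.keys.Nodup → ch.contains k = true →
    L.foldl (fun ch path => ch.modify k PySem.Set.empty (fun s => PySem.Set.add s path)) ch
      = ch.insert k (L.foldl PySem.Set.add (ch.getD k PySem.Set.empty)) := by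
  induction L with
  | nil => intro ch hn hc; simpa using (insert_getD_self ch k hn hc).symm
  | cons p t ih =>
    intro ch hn hc
    simp only [List.foldl_cons]
    have hmod : ch.modify k PySem.Set.empty (fun s => PySem.Set.add s p)
        = ch.insert k (PySem.Set.add (ch.getD k PySem.Set.empty) p) := rfl
    rw [hmod]
    have hn' : (ch.insert k (PySem.Set.add (ch.getD k PySem.Set.empty) p)).keys.Nodup := by
      rw [PySem.Dict.keys_insert_of_contains ch _ hc]; exact hn
    have hc' := PySem.Dict.contains_insert_self ch k (PySem.Set.add (ch.getD k PySem.Set.empty) p)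
    rw [ih _ hn' hc', PySem.Dict.getD_insert_self, PySem.Dict.insert_insert_self]

lemma foldl_if_collapse (k : String) (c : String → Bool) (L : List String) : ∀ (ch : PySem.Dict String (List String)),
    ch.keys.Nodup → ch.contains k = true →
    L.foldl (fun ch path => if c path = true then ch.modify k PySem.Set.empty (fun s => PySem.Set.add s path) else ch) ch
      = ch.insert k ((L.filter c).foldl PySem.Set.add (ch.getD k PySem.Set.empty)) := by
  induction L with
  | nil => intro ch hn hc; simpa using (insert_getD_self ch k hn hc).symm
  | cons p t ih =>
    intro ch hn hc
    simp only [List.foldl_cons, List.filter_cons]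
    by_cases h : c p = true
    · simp only [h, if_true]
      have hmod : ch.modify k PySem.Set.empty (fun s => PySem.Set.add s p)
          = ch.insert k (PySem.Set.add (ch.getD k PySem.Set.empty) p) := rfl
      rw [hmod]
      have hn' : (ch.insert k (PySem.Set.add (ch.getD k PySem.Set.empty) p)).keys.Nodup := by
        rw [PySem.Dict.keys_insert_of_contains ch _ hc]; exact hn
      have hc' := PySem.Dict.contains_insert_self ch k (PySem.Set.add (ch.getD k PySem.Set.empty) p)
      rw [ih _ hn' hc', PySem.Dict.getD_insert_self, PySem.Dict.insert_insert_self]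
      simp [List.foldl_cons]
    · simp only [h, if_neg, Bool.false_eq_true, not_false_eq_true]
      exact ih ch hn hc

lemma stepA_collapse (before : List (String × List (String × String))) (after : List (String × List (String × String))) (ext : String) (ch : PySem.Dict String (List String))
    (hn : ch.keys.Nodup) (hc : ch.contains ext = true) :
    pvStepA before after ch ext = ch.insert ext (pvVA before after ext (ch.getD ext PySem.Set.empty)) := by
  have hfun : (fun (ch : PySem.Dict String (List String)) path =>
        if (pvGet after ext).getD path "" ≠ (pvGet before ext).getD path ""
        then ch.modify ext PySem.Set.empty (fun s => PySem.Set.add s path) else ch)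
      = (fun (ch : PySem.Dict String (List String)) path =>
        if (decide ((pvGet after ext).getD path "" ≠ (pvGet before ext).getD path "")) = true
        then ch.modify ext PySem.Set.empty (fun s => PySem.Set.add s path) else ch) := by
    funext ch' path
    by_cases hP : (pvGet after ext).getD path "" ≠ (pvGet before ext).getD path ""
    · simp [hP]
    · simp [hP]
  show (PySem.Set.inter (PySem.Set.ofList (pvGet after ext).keys) (PySem.Set.ofList (pvGet before ext).keys)).foldl
      (fun ch path => if (pvGet after ext).getD path "" ≠ (pvGet before ext).getD path ""
        then ch.modify ext PySem.Set.empty (fun s => PySem.Set.add s path) else ch)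
      ((PySem.Set.diff (PySem.Set.ofList (pvGet after ext).keys) (PySem.Set.ofList (pvGet before ext).keys)).foldl
        (fun ch path => ch.modify ext PySem.Set.empty (fun s => PySem.Set.add s path)) ch)
    = ch.insert ext (pvVA before after ext (ch.getD ext PySem.Set.empty))
  rw [foldl_modify_collapse ext _ ch hn hc]
  rw [hfun]
  have hn' : (ch.insert ext ((PySem.Set.diff (PySem.Set.ofList (pvGet after ext).keys) (PySem.Set.ofList (pvGet before ext).keys)).foldl PySem.Set.add (ch.getD ext PySem.Set.empty))).keys.Nodup := by
    rw [PySem.Dict.keys_insert_of_contains ch _ hc]; exact hn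
  rw [foldl_if_collapse ext _ _ _ hn' (PySem.Dict.contains_insert_self ch ext _)]
  rw [PySem.Dict.getD_insert_self, PySem.Dict.insert_insert_self]
  rfl

lemma contains_foldl_insert_of_base (xs : List String) : ∀ (d : PySem.Dict String (List String)) (e : String),
    d.contains e = true → (xs.foldl (fun ch x => ch.insert x PySem.Set.empty) d).contains e = true := by
  induction xs with
  | nil => intro d e h; simpa using h
  | cons x t ih =>
    intro d e h
    simp only [List.foldl_cons]
    exact ih _ e (by rw [PySem.Dict.contains_insert]; simp [h])

lemma getD_foldl_insert_of_not_mem (xs : List String) : ∀ (d : PySem.Dict String (List String)) (e : String),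
    e ∉ xs → (xs.foldl (fun ch x => ch.insert x PySem.Set.empty) d).getD e PySem.Set.empty = d.getD e PySem.Set.empty := by
  induction xs with
  | nil => intro d e _; rfl
  | cons x t ih =>
    intro d e h
    simp only [List.mem_cons, not_or] at h
    simp only [List.foldl_cons]
    rw [ih _ e h.2, PySem.Dict.getD_insert_of_ne _ _ _ h.1]

lemma insert_insert_comm_of_contains (d : PySem.Dict String (List String)) (x e : String) (u w : List String)
    (hne : x ≠ e) (hc : d.contains e = true) :
    (d.insert x u).insert e w = (d.insert e w).insert x u := by
  have hbne : (e == x) = false := by simp [Ne.symm hne]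
  have hbne' : (x == e) = false := by simp [hne]
  have hce' : (d.insert x u).contains e = true := by
    rw [PySem.Dict.contains_insert]; simp [hc]
  have hcx' : (d.insert e w).contains x = d.contains x := by
    rw [PySem.Dict.contains_insert]; simp [hbne']
  apply PySem.Dict.ext
  by_cases hx : d.contains x = true
  · rw [PySem.Dict.items_insert_of_contains _ _ hce',
        PySem.Dict.items_insert_of_contains _ _ hx,
        PySem.Dict.items_insert_of_contains _ _ (hcx'.trans hx),
        PySem.Dict.items_insert_of_contains _ _ hc,
        List.map_map, List.map_map]
    apply List.map_congr_left
    intro p _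
    by_cases h1 : p.1 = x
    · simp [Function.comp, h1, hbne']
    · by_cases h2 : p.1 = e
      · simp [Function.comp, h2, hbne]
      · simp [Function.comp, h1, h2]
  · have hx' : d.contains x = false := by revert hx; cases d.contains x <;> simp
    rw [PySem.Dict.items_insert_of_contains _ _ hce',
        PySem.Dict.items_insert_of_not_contains _ _ hx',
        PySem.Dict.items_insert_of_not_contains _ _ (hcx'.trans hx'),
        PySem.Dict.items_insert_of_contains _ _ hc,
        List.map_append]
    simp
    exact fun h => absurd h hne

lemma insert_foldl_insert_comm (xs : List String) (e : String) (w : List String) : ∀ (d : PySem.Dict String (List String)),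
    e ∉ xs → d.contains e = true →
    (xs.foldl (fun ch x => ch.insert x PySem.Set.empty) d).insert e w
      = xs.foldl (fun ch x => ch.insert x PySem.Set.empty) (d.insert e w) := by
  induction xs with
  | nil => intro d _ _; rfl
  | cons x t ih =>
    intro d h hc
    simp only [List.mem_cons, not_or] at h
    simp only [List.foldl_cons]
    rw [ih _ h.2 (by rw [PySem.Dict.contains_insert]; simp [hc]),
        insert_insert_comm_of_contains _ _ _ _ _ (fun hxe => h.1 hxe.symm) hc]

lemma outerA (before : List (String × List (String × String))) (after : List (String × List (String × String))) : ∀ (exts : List String) (d : PySem.Dict String (List String)),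
    exts.Nodup → d.keys.Nodup → (∀ e ∈ exts, d.contains e = false) →
    exts.foldl (pvStepA before after) (exts.foldl (fun ch e => ch.insert e PySem.Set.empty) d)
      = exts.foldl (fun ch e => ch.insert e (pvVA before after e PySem.Set.empty)) d := by
  intro exts
  induction exts with
  | nil => intro d _ _ _; rfl
  | cons e rest ih =>
    intro d hnd hkn hcon
    have he : e ∉ rest := (List.nodup_cons.mp hnd).1
    have hrest : rest.Nodup := (List.nodup_cons.mp hnd).2
    have hce : d.contains e = false := hcon e (by simp)
    have hek : e ∉ d.keys := by
      intro hm
      rw [← PySem.Dict.contains_iff_mem_keys] at hm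
      rw [hce] at hm
      cases hm
    have hd1n : (d.insert e PySem.Set.empty).keys.Nodup := by
      rw [PySem.Dict.keys_insert_of_not_contains _ _ hce]
      simp only [List.nodup_append, hkn, List.nodup_cons, List.not_mem_nil, not_false_eq_true,
        List.nodup_nil, and_true, true_and]
      intro a ha b hb heq
      simp only [List.mem_cons, List.not_mem_nil, or_false] at hb
      subst hb
      exact hek (heq ▸ ha)
    simp only [List.foldl_cons]
    have hDc : (rest.foldl (fun ch x => ch.insert x PySem.Set.empty) (d.insert e PySem.Set.empty)).contains e = true :=
      contains_foldl_insert_of_base rest _ e (PySem.Dict.contains_insert_self d e _)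
    have hDn : (rest.foldl (fun ch x => ch.insert x PySem.Set.empty) (d.insert e PySem.Set.empty)).keys.Nodup :=
      PySem.Dict.nodup_keys_foldl_insert rest (fun _ _ => PySem.Set.empty) _ hd1n
    have hDg : (rest.foldl (fun ch x => ch.insert x PySem.Set.empty) (d.insert e PySem.Set.empty)).getD e PySem.Set.empty = PySem.Set.empty := by
      rw [getD_foldl_insert_of_not_mem rest _ e he, PySem.Dict.getD_insert_self]
    rw [stepA_collapse before after e _ hDn hDc, hDg,
        insert_foldl_insert_comm rest e _ _ he (PySem.Dict.contains_insert_self d e _),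
        PySem.Dict.insert_insert_self]
    refine ih (d.insert e (pvVA before after e PySem.Set.empty)) hrest ?_ ?_
    · rw [PySem.Dict.keys_insert_of_not_contains _ _ hce]
      simp only [List.nodup_append, hkn, List.nodup_cons, List.not_mem_nil, not_false_eq_true,
        List.nodup_nil, and_true, true_and]
      intro a ha b hb heq
      simp only [List.mem_cons, List.not_mem_nil, or_false] at hb
      subst hb
      exact hek (heq ▸ ha)
    · intro x hx
      rw [PySem.Dict.contains_insert]
      have hxe : (x == e) = false := by
        simp only [beq_eq_false_iff_ne, ne_eq]
        intro hxx; exact he (hxx ▸ hx)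
      simp [hxe, hcon x (by simp [hx])]

lemma pvGet_keys_nodup (d : List (String × List (String × String))) (k : String)
    (h : ∀ p ∈ d, (p.2.map (·.1)).Nodup) : (pvGet d k).keys.Nodup := by
  cases hq : (PySem.Dict.mk d).get? k with
  | none => simp [pvGet, PySem.Dict.getD, hq, PySem.Dict.keys]
  | some v =>
    have hmem : (k, v) ∈ d := PySem.Dict.mem_items_of_get?_eq_some (PySem.Dict.mk d) hq
    have := h (k, v) hmem
    simpa [pvGet, PySem.Dict.getD, hq, PySem.Dict.keys] using this

lemma partB_spec (b : PySem.Dict String String) (items : List (String × String)) : ∀ n0 m0 : List String,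
    items.foldl (fun nm pv =>
      if b.contains pv.1 = false then (nm.1 ++ [pv.1], nm.2)
      else if b.getD pv.1 "" ≠ pv.2 then (nm.1, nm.2 ++ [pv.1])
      else nm) (n0, m0)
    = (n0 ++ (items.filter (fun pv => !b.contains pv.1)).map (·.1),
       m0 ++ (items.filter (fun pv => b.contains pv.1 && decide (b.getD pv.1 "" ≠ pv.2))).map (·.1)) := by
  induction items with
  | nil => intro n0 m0; simp
  | cons pv t ih =>
    intro n0 m0
    simp only [List.foldl_cons, List.filter_cons]
    by_cases h1 : b.contains pv.1 = false
    · rw [if_pos h1, ih]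
      simp [h1]
    · have h1' : b.contains pv.1 = true := by revert h1; cases b.contains pv.1 <;> simp
      by_cases h2 : b.getD pv.1 "" ≠ pv.2
      · rw [if_neg (by simp [h1']), if_pos h2, ih]
        simp [h1', h2]
      · rw [if_neg (by simp [h1']), if_neg h2, ih]
        simp [h1', h2]

lemma map_fst_filter (p : String → Bool) (l : List (String × String)) :
    (l.filter (fun pv => p pv.1)).map (fun x => x.1) = (l.map (fun x => x.1)).filter p := by
  induction l with
  | nil => rfl
  | cons pv t ih =>
    simp only [List.filter_cons, List.map_cons]
    by_cases h : p pv.1 = true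
    · simp [h, ih]
    · simp [h, ih]

lemma valEq (before : List (String × List (String × String))) (after : List (String × List (String × String))) (ext : String)
    (_hb : (pvGet before ext).keys.Nodup) (ha : (pvGet after ext).keys.Nodup) :
    pvVA before after ext PySem.Set.empty
      = PySem.Set.union (PySem.Set.ofList (pvPartB (pvGet before ext) ((PySem.Dict.mk after).getD ext [])).1)
                        (PySem.Set.ofList (pvPartB (pvGet before ext) ((PySem.Dict.mk after).getD ext [])).2) := by
  have hContOf : ∀ x, (PySem.Set.ofList (pvGet before ext).keys).contains x = (pvGet before ext).contains x := by
    intro x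
    by_cases h : x ∈ (pvGet before ext).keys
    · have h1 : (PySem.Set.ofList (pvGet before ext).keys).contains x = true := by
        simp [PySem.Set.contains, PySem.Set.mem_ofList, h]
      rw [h1, ((PySem.Dict.contains_iff_mem_keys _ _).mpr h)]
    · have h1 : (PySem.Set.ofList (pvGet before ext).keys).contains x = false := by
        simp [PySem.Set.contains, PySem.Set.mem_ofList, h]
      have h2 : (pvGet before ext).contains x = false := by
        cases hc2 : (pvGet before ext).contains x
        · rfl
        · exact absurd ((PySem.Dict.contains_iff_mem_keys _ _).mp hc2) h
      rw [h1, h2]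
  have hdiff : PySem.Set.diff (PySem.Set.ofList (pvGet after ext).keys) (PySem.Set.ofList (pvGet before ext).keys)
      = (pvGet after ext).keys.filter (fun x => !(pvGet before ext).contains x) := by
    simp only [PySem.Set.diff, set_ofList_self ha]
    exact List.filter_congr (fun x _ => by rw [hContOf x])
  have hinter : PySem.Set.inter (PySem.Set.ofList (pvGet after ext).keys) (PySem.Set.ofList (pvGet before ext).keys)
      = (pvGet after ext).keys.filter (fun x => (pvGet before ext).contains x) := by
    simp only [PySem.Set.inter, set_ofList_self ha]
    exact List.filter_congr (fun x _ => by rw [hContOf x])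
  have hdn : ((pvGet after ext).keys.filter (fun x => !(pvGet before ext).contains x)).Nodup := ha.filter _
  have hfin : (((pvGet after ext).keys.filter (fun x => (pvGet before ext).contains x)).filter
      (fun path => decide ((pvGet after ext).getD path "" ≠ (pvGet before ext).getD path ""))).Nodup :=
    (ha.filter _).filter _
  have hdisj : ∀ x ∈ ((pvGet after ext).keys.filter (fun x => (pvGet before ext).contains x)).filter
      (fun path => decide ((pvGet after ext).getD path "" ≠ (pvGet before ext).getD path "")),
      x ∉ (pvGet after ext).keys.filter (fun x => !(pvGet before ext).contains x) := by
    intro x hx hmem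
    rw [List.mem_filter] at hx hmem
    rw [List.mem_filter] at hx
    have h1 : (pvGet before ext).contains x = true := hx.1.2
    have h2 : (!(pvGet before ext).contains x) = true := hmem.2
    rw [h1] at h2
    cases h2
  have hP : pvPartB (pvGet before ext) ((PySem.Dict.mk after).getD ext [])
      = ((((PySem.Dict.mk after).getD ext []).filter (fun pv => !(pvGet before ext).contains pv.1)).map (fun x => x.1),
         (((PySem.Dict.mk after).getD ext []).filter (fun pv => (pvGet before ext).contains pv.1 && decide ((pvGet before ext).getD pv.1 "" ≠ pv.2))).map (fun x => x.1)) := by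
    unfold pvPartB
    rw [partB_spec]
    simp
  have hmodc : ((PySem.Dict.mk after).getD ext []).filter (fun pv => (pvGet before ext).contains pv.1 && decide ((pvGet before ext).getD pv.1 "" ≠ pv.2))
      = ((PySem.Dict.mk after).getD ext []).filter (fun pv => (pvGet before ext).contains pv.1 && decide ((pvGet after ext).getD pv.1 "" ≠ (pvGet before ext).getD pv.1 "")) := by
    refine List.filter_congr (fun pv hpv => ?_)
    have hv : (pvGet after ext).getD pv.1 "" = pv.2 :=
      PySem.Dict.getD_of_mem_items (pvGet after ext) (show (pv.1, pv.2) ∈ (pvGet after ext).items by simpa using hpv) ha ""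
    simp only [← hv]
    congr 1
    exact decide_eq_decide.mpr ne_comm
  have hBnew : (pvPartB (pvGet before ext) ((PySem.Dict.mk after).getD ext [])).1
      = (pvGet after ext).keys.filter (fun x => !(pvGet before ext).contains x) := by
    rw [hP]
    exact map_fst_filter (fun x => !(pvGet before ext).contains x) _
  have hBmod : (pvPartB (pvGet before ext) ((PySem.Dict.mk after).getD ext [])).2
      = (pvGet after ext).keys.filter (fun x => (pvGet before ext).contains x && decide ((pvGet after ext).getD x "" ≠ (pvGet before ext).getD x "")) := by
    rw [hP]
    show (((PySem.Dict.mk after).getD ext []).filter _).map _ = _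
    rw [hmodc]
    exact map_fst_filter (fun x => (pvGet before ext).contains x && decide ((pvGet after ext).getD x "" ≠ (pvGet before ext).getD x "")) _
  have hmodN : ((pvGet after ext).keys.filter (fun x => (pvGet before ext).contains x && decide ((pvGet after ext).getD x "" ≠ (pvGet before ext).getD x ""))).Nodup := ha.filter _
  have hdisj2 : ∀ x ∈ (pvGet after ext).keys.filter (fun x => (pvGet before ext).contains x && decide ((pvGet after ext).getD x "" ≠ (pvGet before ext).getD x "")),
      x ∉ (pvGet after ext).keys.filter (fun x => !(pvGet before ext).contains x) := by
    intro x hx hmem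
    rw [List.mem_filter] at hx hmem
    have h1 : (pvGet before ext).contains x = true := by
      have h := hx.2
      simp only [Bool.and_eq_true] at h
      exact h.1
    have h2 : (!(pvGet before ext).contains x) = true := hmem.2
    rw [h1] at h2
    cases h2
  unfold pvVA
  rw [hdiff, hinter,
      set_foldl_add_append _ PySem.Set.empty hdn (by intro x _; simp [PySem.Set.empty]),
      show (PySem.Set.empty : List String) ++ (pvGet after ext).keys.filter (fun x => !(pvGet before ext).contains x)
        = (pvGet after ext).keys.filter (fun x => !(pvGet before ext).contains x) from List.nil_append _,
      set_foldl_add_append _ _ hfin hdisj,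
      hBnew, hBmod, set_ofList_self hdn, set_ofList_self hmodN]
  simp only [PySem.Set.union, PySem.Set.update]
  rw [set_foldl_add_append _ _ hmodN hdisj2]
  congr 1
  rw [List.filter_filter]
  exact List.filter_congr (fun x _ => Bool.and_comm _ _)

-- ===== VERDICT (by name: the statement is the Claim_ definition above) =====
theorem diff_changed_spec : Claim_equal_diff_changed := by
  intro before after exts _hdom hpre
  unfold Pre_diff_changed at hpre
  simp only [Bool.and_eq_true, List.all_eq_true] at hpre
  obtain ⟨⟨⟨⟨hexb, _hbk⟩, _hak⟩, hbvb⟩, havb⟩ := hpre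
  have hex : exts.Nodup := (pvNodupB_iff exts).mp hexb
  have hbv : ∀ p ∈ before, (p.2.map (fun q => q.1)).Nodup := fun p hp => (pvNodupB_iff _).mp (hbvb p hp)
  have hav : ∀ p ∈ after, (p.2.map (fun q => q.1)).Nodup := fun p hp => (pvNodupB_iff _).mp (havb p hp)
  unfold Spec_diff_changed diff_changed diff_changed_alt
  show (exts.foldl (pvStepA before after) (exts.foldl (fun ch e => ch.insert e PySem.Set.empty) PySem.Dict.empty)).items
      = (exts.foldl (pvStepB before after) PySem.Dict.empty).items
  rw [outerA before after exts PySem.Dict.empty hex PySem.Dict.nodup_keys_empty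
        (fun e _ => PySem.Dict.contains_empty e)]
  congr 1
  refine PySem.List.foldl_congr_mem exts _ _ PySem.Dict.empty ?_
  intro acc x _hx
  rw [valEq before after x (pvGet_keys_nodup before x hbv) (pvGet_keys_nodup after x hav)]
  rfl
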